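-- pv_equiv track=rewrite | github.com/GodDoesNotPlayDice/Python_2020_2021 | ejerciciosPython/python_mas/ejercicos/ejercicio20.py | searchMayus
-- ===== SOURCE A (Python) =====
-- def searchMayus(a=str()):
--     arr=list()
--     b=list()
--     for x in a:
--         arr.append(x)
--         for z in arr:
--             pass
--         if arr.count(z.upper()):
--             if arr.count(z.lower()):
--                 pass
--             else:
--                 b.append(z)
--     return f'Este texto tiene {len(b)} palabras en mayusculas'
-- ===== SOURCE B (Python) =====
-- def searchMayus(a=str()):
--     firstidx = {}
--     for i, x in enumerate(a):
--         firstidx.setdefault(x, i)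
--     n = 0
--     for i, x in enumerate(a):
--         u = firstidx.get(x.upper())
--         l = firstidx.get(x.lower())
--         if u is not None and u <= i and (l is None or l > i):
--             n += 1
--     return f'Este texto tiene {n} palabras en mayusculas'
-- ===== Notes on version B (the rewrite author's own statement) =====
-- stated objective: faster
-- what changed: Replaces A's running prefix list with two list.count scans per character (O(n^2)) by one pass that records each character's first-occurrence index in a dict, then a single enumerate pass testing 'first index of x.upper() <= i and first index of x.lower() absent or > i'.
import Mathlib
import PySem

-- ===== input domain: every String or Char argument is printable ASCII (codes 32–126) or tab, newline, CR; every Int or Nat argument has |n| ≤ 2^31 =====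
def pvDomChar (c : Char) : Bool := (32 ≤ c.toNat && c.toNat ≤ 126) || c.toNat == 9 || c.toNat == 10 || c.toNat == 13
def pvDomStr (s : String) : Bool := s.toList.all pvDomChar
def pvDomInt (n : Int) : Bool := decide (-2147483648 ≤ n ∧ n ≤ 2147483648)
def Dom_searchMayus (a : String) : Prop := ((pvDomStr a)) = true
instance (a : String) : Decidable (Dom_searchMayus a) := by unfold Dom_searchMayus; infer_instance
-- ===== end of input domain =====

-- B replaces A's per-position list.count scans (O(n^2)) by a first-occurrence index table built
-- in one pass and then a single counting scan (O(n)): objective = faster.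

-- ===== PORT A =====
-- A's inner 'for z in arr: pass' leaves z bound to the last element of arr (arr is nonempty here,
-- having just been appended to); ported literally as a foldl over arr.
def searchMayusStepA (st : List Char × List Char) (x : Char) : List Char × List Char :=
  let arr := st.1 ++ [x]
  let z := arr.foldl (fun _ c => c) x
  if PySem.List.count arr (PySem.Chars.upperChar z) ≠ 0 then
    if PySem.List.count arr (PySem.Chars.lowerChar z) ≠ 0 then (arr, st.2)
    else (arr, st.2 ++ [z])
  else (arr, st.2)

def searchMayus (a : String) : String :=
  let st := a.toList.foldl searchMayusStepA ([], [])
  String.mk ("Este texto tiene ".toList ++ PySem.Int.toChars (st.2.length : Int)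
             ++ " palabras en mayusculas".toList)

-- ===== PORT B =====
-- Source B: 'u is not None and u <= i and (l is None or l > i)'.
def searchMayusCondB (firstidx : PySem.Dict Char Int) (i : Int) (x : Char) : Bool :=
  (match firstidx.get? (PySem.Chars.upperChar x) with
   | some j => decide (j ≤ i)
   | none => false) &&
  (match firstidx.get? (PySem.Chars.lowerChar x) with
   | some j => decide (i < j)
   | none => true)

def searchMayus_alt (a : String) : String :=
  let firstidx := (PySem.List.enumerate a.toList 0).foldl
      (fun d p => d.setdefault p.2 p.1) (PySem.Dict.empty : PySem.Dict Char Int)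
  let n := (PySem.List.enumerate a.toList 0).foldl
      (fun n p => if searchMayusCondB firstidx p.1 p.2 then n + 1 else n) (0 : Int)
  String.mk ("Este texto tiene ".toList ++ PySem.Int.toChars n
             ++ " palabras en mayusculas".toList)

-- ===== PRECONDITION & SPEC =====
def Spec_searchMayus (a : String) (out : String) : Prop := out = searchMayus_alt a
instance (a : String) (out : String) : Decidable (Spec_searchMayus a out) := by unfold Spec_searchMayus; infer_instance

-- ===== CLAIM (what is proved, stated in full; the proofs are below) =====
def Claim_equal_searchMayus : Prop := ∀ (a : String), Dom_searchMayus a → Spec_searchMayus a (searchMayus a)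

-- ===== LEMMAS AND PROOFS =====

-- condition A tests at each position: upper(z) seen in the prefix (inclusive), lower(z) not seen
def condA (arr : List Char) (z : Char) : Bool :=
  decide (PySem.Chars.upperChar z ∈ arr) && decide (PySem.Chars.lowerChar z ∉ arr)

-- number of appended characters of A's loop over the remaining suffix, given the processed prefix
def countSpecA : List Char → List Char → Nat
  | _, [] => 0
  | pre, x :: t => (if condA (pre ++ [x]) x then 1 else 0) + countSpecA (pre ++ [x]) t

theorem searchMayus_z_last (pre : List Char) (x : Char) :
    List.foldl (fun _ c => c) x (pre ++ [x]) = x := by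
  simp [List.foldl_append]

theorem searchMayus_count_mem (l : List Char) (a : Char) :
    (PySem.List.count l a ≠ 0) ↔ a ∈ l := by
  rw [PySem.List.count_eq, Ne, List.count_eq_zero]
  exact not_not

theorem searchMayus_stepA_eq (st : List Char × List Char) (x : Char) :
    searchMayusStepA st x
      = (st.1 ++ [x], if condA (st.1 ++ [x]) x then st.2 ++ [x] else st.2) := by
  simp only [searchMayusStepA, searchMayus_z_last]
  by_cases hu : PySem.Chars.upperChar x ∈ st.1 ++ [x]
  · by_cases hl : PySem.Chars.lowerChar x ∈ st.1 ++ [x]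
    · have hc : condA (st.1 ++ [x]) x = false := by
        unfold condA
        rw [decide_eq_false (not_not_intro hl), Bool.and_false]
      rw [if_pos ((searchMayus_count_mem _ _).mpr hu),
          if_pos ((searchMayus_count_mem _ _).mpr hl), hc]
      simp
    · have hc : condA (st.1 ++ [x]) x = true := by
        unfold condA
        rw [decide_eq_true hu, decide_eq_true hl, Bool.true_and]
      rw [if_pos ((searchMayus_count_mem _ _).mpr hu),
          if_neg (fun h => hl ((searchMayus_count_mem _ _).mp h)), hc]
      simp
  · have hc : condA (st.1 ++ [x]) x = false := by
      unfold condA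
      rw [decide_eq_false hu, Bool.false_and]
    rw [if_neg (fun h => hu ((searchMayus_count_mem _ _).mp h)), hc]
    simp

theorem searchMayus_foldA_snd (l : List Char) : ∀ (pre b : List Char),
    ((List.foldl searchMayusStepA (pre, b) l).2).length = b.length + countSpecA pre l := by
  induction l with
  | nil => intro pre b; simp [countSpecA]
  | cons x t ih =>
      intro pre b
      rw [List.foldl_cons, searchMayus_stepA_eq]
      by_cases h : condA (pre ++ [x]) x <;>
        simp [h, countSpecA, ih (pre ++ [x])] <;> omega

-- first-occurrence dictionary: get? is the first index of c in l, offset by the start s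
theorem searchMayus_dict_get? (l : List Char) : ∀ (s : Int) (d : PySem.Dict Char Int) (c : Char),
    ((PySem.List.enumerate l s).foldl (fun d p => d.setdefault p.2 p.1) d).get? c
      = (d.get? c).or ((PySem.List.index? l c).map (fun k => s + (k : Int))) := by
  induction l with
  | nil =>
      intro s d c
      rw [PySem.List.enumerate_nil]
      have : PySem.List.index? ([] : List Char) c = none := by
        simp [PySem.List.index?_eq_idxOf?]
      rw [this]
      simp
  | cons x t ih =>
      intro s d c
      rw [PySem.List.enumerate_cons, List.foldl_cons, ih]
      by_cases hc : c = x
      · subst hc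
        rw [PySem.List.index?_cons_self]
        rcases hcont : d.contains c with _ | _
        · rw [PySem.Dict.setdefault_of_not_contains d s hcont]
          have hd : d.get? c = none := by
            have h2 := PySem.Dict.contains_eq_isSome_get? d c
            rw [hcont] at h2
            exact Option.not_isSome_iff_eq_none.mp (by simp [← h2])
          rw [PySem.Dict.get?_insert]
          simp [hd]
        · rw [PySem.Dict.setdefault_of_contains d s hcont]
          have hs : (d.get? c).isSome := by
            rw [← PySem.Dict.contains_eq_isSome_get?, hcont]
          rcases hv : d.get? c with _ | v
          · rw [hv] at hs; simp at hs
          · simp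
      · have hget : (d.setdefault x s).get? c = d.get? c := by
          rcases hcont : d.contains x with _ | _
          · rw [PySem.Dict.setdefault_of_not_contains d s hcont, PySem.Dict.get?_insert]
            simp [hc]
          · rw [PySem.Dict.setdefault_of_contains d s hcont]
        rw [hget, PySem.List.index?_cons_of_ne t (Ne.symm hc)]
        rcases hk : PySem.List.index? t c with _ | k
        · simp
        · have he : s + 1 + (k : Int) = s + ((k + 1 : Nat) : Int) := by push_cast; ring
          congr 1
          simp [he]

theorem searchMayus_mem_take_iff (l : List Char) (c : Char) : ∀ (n : Nat),
    c ∈ l.take n ↔ ∃ k, PySem.List.index? l c = some k ∧ k < n := by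
  induction l with
  | nil =>
      intro n
      have : PySem.List.index? ([] : List Char) c = none := by
        simp [PySem.List.index?_eq_idxOf?]
      rw [this]
      simp
  | cons x t ih =>
      intro n
      cases n with
      | zero => simp
      | succ m =>
          by_cases hc : c = x
          · subst hc
            rw [PySem.List.index?_cons_self]
            simp
          · rw [PySem.List.index?_cons_of_ne t (Ne.symm hc), List.take_succ_cons]
            constructor
            · intro hmem
              rcases List.mem_cons.mp hmem with h | h
              · exact absurd h hc
              · rcases (ih m).mp h with ⟨k, hk, hlt⟩
                exact ⟨k + 1, by rw [hk]; rfl, by omega⟩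
            · rintro ⟨k, hk, hlt⟩
              rcases hj : PySem.List.index? t c with _ | j
              · rw [hj] at hk; simp at hk
              · rw [hj] at hk
                simp only [Option.map_some, Option.some.injEq] at hk
                exact List.mem_cons_of_mem x ((ih m).mpr ⟨j, hj, by omega⟩)

-- the bridge: B's dictionary test at position pre.length equals A's prefix-membership test
theorem searchMayus_cond_bridge (l pre t : List Char) (x : Char) (hl : l = pre ++ x :: t) :
    searchMayusCondB
      ((PySem.List.enumerate l 0).foldl (fun d p => d.setdefault p.2 p.1)
        (PySem.Dict.empty : PySem.Dict Char Int)) (pre.length : Int) x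
      = condA (pre ++ [x]) x := by
  have htake : l.take (pre.length + 1) = pre ++ [x] := by
    subst hl
    rw [List.take_append]
    simp
  have hmem : ∀ c : Char, (c ∈ pre ++ [x]) ↔
      ∃ k, PySem.List.index? l c = some k ∧ k < pre.length + 1 := by
    intro c
    rw [← htake, searchMayus_mem_take_iff]
  have hget : ∀ c : Char,
      ((PySem.List.enumerate l 0).foldl (fun d p => d.setdefault p.2 p.1)
        (PySem.Dict.empty : PySem.Dict Char Int)).get? c
      = (PySem.List.index? l c).map (fun k => (k : Int)) := by
    intro c
    rw [searchMayus_dict_get? l 0 _ c]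
    simp
  unfold searchMayusCondB condA
  rw [hget, hget]
  rcases hu : PySem.List.index? l (PySem.Chars.upperChar x) with _ | ku <;>
    rcases hlo : PySem.List.index? l (PySem.Chars.lowerChar x) with _ | kl
  · -- both absent
    have hU : PySem.Chars.upperChar x ∉ pre ++ [x] := by
      rw [hmem]; rintro ⟨k, hk, _⟩; rw [hu] at hk; cases hk
    show false = (decide (PySem.Chars.upperChar x ∈ pre ++ [x])
        && decide (PySem.Chars.lowerChar x ∉ pre ++ [x]))
    rw [decide_eq_false hU, Bool.false_and]
  · -- upper absent, lower present
    have hU : PySem.Chars.upperChar x ∉ pre ++ [x] := by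
      rw [hmem]; rintro ⟨k, hk, _⟩; rw [hu] at hk; cases hk
    show false = (decide (PySem.Chars.upperChar x ∈ pre ++ [x])
        && decide (PySem.Chars.lowerChar x ∉ pre ++ [x]))
    rw [decide_eq_false hU, Bool.false_and]
  · -- upper present, lower absent
    have hU : (PySem.Chars.upperChar x ∈ pre ++ [x]) ↔ ((ku : Int) ≤ (pre.length : Int)) := by
      rw [hmem]
      constructor
      · rintro ⟨k, hk, hlt⟩; rw [hu] at hk
        simp only [Option.some.injEq] at hk
        subst hk; exact_mod_cast Nat.lt_succ_iff.mp hlt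
      · intro h; exact ⟨ku, hu, by omega⟩
    have hL : PySem.Chars.lowerChar x ∉ pre ++ [x] := by
      rw [hmem]; rintro ⟨k, hk, _⟩; rw [hlo] at hk; cases hk
    show (decide ((ku : Int) ≤ (pre.length : Int)) && true)
        = (decide (PySem.Chars.upperChar x ∈ pre ++ [x])
            && decide (PySem.Chars.lowerChar x ∉ pre ++ [x]))
    rw [decide_eq_decide.mpr hU, decide_eq_true hL]
  · -- both present
    have hU : (PySem.Chars.upperChar x ∈ pre ++ [x]) ↔ ((ku : Int) ≤ (pre.length : Int)) := by
      rw [hmem]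
      constructor
      · rintro ⟨k, hk, hlt⟩; rw [hu] at hk
        simp only [Option.some.injEq] at hk
        subst hk; exact_mod_cast Nat.lt_succ_iff.mp hlt
      · intro h; exact ⟨ku, hu, by omega⟩
    have hL : (PySem.Chars.lowerChar x ∉ pre ++ [x]) ↔ ((pre.length : Int) < (kl : Int)) := by
      rw [hmem]
      constructor
      · intro h
        by_contra hnot
        exact h ⟨kl, hlo, by omega⟩
      · rintro h ⟨k, hk, hlt⟩; rw [hlo] at hk
        simp only [Option.some.injEq] at hk
        subst hk; omega
    show (decide ((ku : Int) ≤ (pre.length : Int)) && decide ((pre.length : Int) < (kl : Int)))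
        = (decide (PySem.Chars.upperChar x ∈ pre ++ [x])
            && decide (PySem.Chars.lowerChar x ∉ pre ++ [x]))
    rw [decide_eq_decide.mpr hU, decide_eq_decide.mpr hL]

theorem searchMayus_foldB (l : List Char) : ∀ (t pre : List Char), l = pre ++ t → ∀ (n0 : Int),
    (PySem.List.enumerate t (pre.length : Int)).foldl
        (fun n p => if searchMayusCondB
            ((PySem.List.enumerate l 0).foldl (fun d p => d.setdefault p.2 p.1)
              (PySem.Dict.empty : PySem.Dict Char Int)) p.1 p.2 then n + 1 else n) n0
      = n0 + (countSpecA pre t : Int) := by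
  intro t
  induction t with
  | nil => intro pre _ n0; simp [PySem.List.enumerate_nil, countSpecA]
  | cons x t ih =>
      intro pre hl n0
      rw [PySem.List.enumerate_cons, List.foldl_cons]
      rw [searchMayus_cond_bridge l pre t x hl]
      have hlen : ((pre.length : Int) + 1) = (((pre ++ [x]).length : Nat) : Int) := by
        simp
      rw [hlen, ih (pre ++ [x]) (by simpa using hl)]
      by_cases h : condA (pre ++ [x]) x <;> simp [h, countSpecA] <;> push_cast <;> ring

-- ===== VERDICT (by name: the statement is the Claim_ definition above) =====
theorem searchMayus_spec : Claim_equal_searchMayus := by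
  unfold Claim_equal_searchMayus
  intro a _
  unfold Spec_searchMayus searchMayus searchMayus_alt
  have hA : ((a.toList.foldl searchMayusStepA ([], [])).2).length = countSpecA [] a.toList := by
    simpa using searchMayus_foldA_snd a.toList [] []
  have hB := searchMayus_foldB a.toList a.toList [] rfl 0
  simp only [List.length_nil, Int.natCast_zero, Nat.cast_zero, zero_add] at hB
  simp only [hA, hB]
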